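-- pv_equiv track=rewrite | github.com/abcp4/sumarizador_pt_br | train_multigpu_vast.py | select_preview_examples
-- ===== SOURCE A (Python) =====
-- from typing import Dict, List, Optional, Tuple
--
-- def select_preview_examples(val_examples: List[Dict]) -> List[Dict]:
--     ordered_types = ["curtos", "hierarquico", "topicos", "sem_restricao"]
--     selected_examples: List[Dict] = []
--     for summary_type in ordered_types:
--         ex = next((item for item in val_examples if item.get("summary_type") == summary_type), None)
--         if ex is not None:
--             selected_examples.append(ex)
--     return selected_examples
-- ===== SOURCE B (Python) =====
-- def select_preview_examples(val_examples):
--     rank = {"curtos": 0, "hierarquico": 1, "topicos": 2, "sem_restricao": 3}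
--     found = []
--     seen = set()
--     for item in val_examples:
--         t = item.get("summary_type")
--         if t in rank and t not in seen:
--             seen.add(t)
--             found.append((rank[t], item))
--     found.sort(key=lambda p: p[0])
--     return [item for _, item in found]
-- ===== Notes on version B (the rewrite author's own statement) =====
-- stated objective: alternative
-- what changed: Instead of one first-match scan per summary type, B makes a single pass that tags each first-seen known-type item with that type's rank, then stably sorts the collected pairs by rank and projects the items.
import Mathlib
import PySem

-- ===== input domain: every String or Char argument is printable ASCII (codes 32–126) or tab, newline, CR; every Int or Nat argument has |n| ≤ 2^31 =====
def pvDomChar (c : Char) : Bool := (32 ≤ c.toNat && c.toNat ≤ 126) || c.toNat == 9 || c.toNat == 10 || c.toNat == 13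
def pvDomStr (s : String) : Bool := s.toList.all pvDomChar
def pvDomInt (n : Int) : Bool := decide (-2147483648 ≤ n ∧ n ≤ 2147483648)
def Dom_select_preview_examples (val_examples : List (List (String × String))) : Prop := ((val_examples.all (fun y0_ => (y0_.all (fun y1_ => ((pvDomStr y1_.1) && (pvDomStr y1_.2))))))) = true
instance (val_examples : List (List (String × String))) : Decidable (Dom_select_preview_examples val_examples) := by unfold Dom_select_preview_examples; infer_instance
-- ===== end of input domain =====

-- B replaces A's four per-type first-match scans by one collect pass (tag each first-seen
-- known-type item with its rank) followed by a stable sort by rank; alternative algorithm, same results.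

-- item.get("summary_type"): first match in the association list (shared by both ports)
def pyGetA : List (String × String) → String → Option String
  | [], _ => none
  | (k, v) :: rest, key => if k == key then some v else pyGetA rest key

-- ===== PORT A =====
def select_preview_examples (val_examples : List (List (String × String))) : List (List (String × String)) :=
  let ordered_types := ["curtos", "hierarquico", "topicos", "sem_restricao"]
  ordered_types.foldl
    (fun selected summary_type =>
      match val_examples.find? (fun item => pyGetA item "summary_type" == some summary_type) with
      | some ex => selected ++ [ex]
      | none => selected)
    []

-- ===== PORT B =====
-- rank = {"curtos": 0, "hierarquico": 1, "topicos": 2, "sem_restricao": 3}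
def pvRank : PySem.Dict String Int := PySem.Dict.mk [("curtos", 0), ("hierarquico", 1), ("topicos", 2), ("sem_restricao", 3)]

-- one loop iteration of B: state = (seen, found)
def bStep (st : List String × List (Int × List (String × String))) (item : List (String × String)) :
    List String × List (Int × List (String × String)) :=
  match pyGetA item "summary_type" with
  | none => st                                   -- t = None: 't in rank' is False
  | some t =>
    match PySem.Dict.get? pvRank t with          -- 't in rank' / 'rank[t]'
    | none => st
    | some r => if st.1.contains t then st
                else (PySem.Set.add st.1 t, st.2 ++ [(r, item)])

def select_preview_examples_alt (val_examples : List (List (String × String))) : List (List (String × String)) :=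
  let found := (val_examples.foldl bStep ([], [])).2
  (PySem.List.sorted found (fun p => p.1) false).map (·.2)

-- ===== PRECONDITION & SPEC =====
def Spec_select_preview_examples (val_examples : List (List (String × String))) (out : List (List (String × String))) : Prop := out = select_preview_examples_alt val_examples
instance (val_examples : List (List (String × String))) (out : List (List (String × String))) : Decidable (Spec_select_preview_examples val_examples out) := by unfold Spec_select_preview_examples; infer_instance

-- ===== CLAIM (what is proved, stated in full; the proofs are below) =====
def Claim_equal_select_preview_examples : Prop := ∀ (val_examples : List (List (String × String))), Dom_select_preview_examples val_examples → Spec_select_preview_examples val_examples (select_preview_examples val_examples)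

-- ===== LEMMAS AND PROOFS =====

-- A's first-match query for one type
def pvFind (xs : List (List (String × String))) (t : String) : Option (List (String × String)) :=
  xs.find? (fun item => pyGetA item "summary_type" == some t)

-- the pairs B's loop still adds from xs, starting from a given seen set (recursion mirror of the fold)
def pvCollect : List (List (String × String)) → List String → List (Int × List (String × String))
  | [], _ => []
  | x :: xs, seen =>
    match pyGetA x "summary_type" with
    | none => pvCollect xs seen
    | some t =>
      match PySem.Dict.get? pvRank t with
      | none => pvCollect xs seen
      | some r => if seen.contains t then pvCollect xs seen
                  else (r, x) :: pvCollect xs (PySem.Set.add seen t)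

-- one rank-ordered slot of the target list
def pvPick (xs : List (List (String × String))) (seen : List String) (r : Int) (t : String) :
    List (Int × List (String × String)) :=
  if seen.contains t then [] else
    match pvFind xs t with
    | some e => [(r, e)]
    | none => []

def pvTarget (xs : List (List (String × String))) (seen : List String) :
    List (Int × List (String × String)) :=
  pvPick xs seen 0 "curtos" ++ pvPick xs seen 1 "hierarquico" ++
  pvPick xs seen 2 "topicos" ++ pvPick xs seen 3 "sem_restricao"

theorem foldl_bStep_snd (xs : List (List (String × String))) (seen : List String)
    (found : List (Int × List (String × String))) :
    (xs.foldl bStep (seen, found)).2 = found ++ pvCollect xs seen := by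
  induction xs generalizing seen found with
  | nil => simp [pvCollect]
  | cons x xs ih =>
    simp only [List.foldl_cons, bStep, pvCollect]
    cases pyGetA x "summary_type" with
    | none => exact ih seen found
    | some t =>
      cases hr : PySem.Dict.get? pvRank t with
      | none => simp only [hr]; exact ih seen found
      | some r =>
        simp only [hr]
        by_cases h : t ∈ seen
        · simp [h, ih]
        · simp [h, ih, List.append_assoc]

theorem pvFind_cons (x : List (String × String)) (xs : List (List (String × String))) (t : String) :
    pvFind (x :: xs) t = if pyGetA x "summary_type" == some t then some x else pvFind xs t := by
  simp [pvFind, List.find?_cons]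
  split <;> simp_all

theorem pvPick_cons_ne (x : List (String × String)) (xs : List (List (String × String)))
    (seen : List String) (r : Int) (t : String)
    (h : pyGetA x "summary_type" ≠ some t) :
    pvPick (x :: xs) seen r t = pvPick xs seen r t := by
  simp [pvPick, pvFind_cons, h]

theorem pvPick_add_ne (xs : List (List (String × String))) (seen : List String)
    (r : Int) (t t' : String) (h : t' ≠ t) :
    pvPick xs (PySem.Set.add seen t) r t' = pvPick xs seen r t' := by
  simp [pvPick, PySem.Set.mem_add, h]

theorem pvPick_of_contains (xs : List (List (String × String))) (seen : List String)
    (r : Int) (t : String) (h : seen.contains t = true) :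
    pvPick xs seen r t = [] := by
  unfold pvPick
  rw [if_pos h]

theorem pvPick_add_self (xs : List (List (String × String))) (seen : List String)
    (r : Int) (t : String) :
    pvPick xs (PySem.Set.add seen t) r t = [] := by
  simp [pvPick, PySem.Set.mem_add]

theorem pvCollect_perm (xs : List (List (String × String))) (seen : List String) :
    (pvTarget xs seen).Perm (pvCollect xs seen) := by
  induction xs generalizing seen with
  | nil => simp [pvTarget, pvPick, pvFind, pvCollect]
  | cons x xs ih =>
    simp only [pvCollect]
    cases hg : pyGetA x "summary_type" with
    | none =>
      have e : pvTarget (x :: xs) seen = pvTarget xs seen := by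
        simp [pvTarget, pvPick_cons_ne, hg]
      rw [e]; exact ih seen
    | some t =>
      cases hr : PySem.Dict.get? pvRank t with
      | none =>
        simp only [hr]
        have h4 : t ≠ "curtos" ∧ t ≠ "hierarquico" ∧ t ≠ "topicos" ∧ t ≠ "sem_restricao" := by
          refine ⟨?_, ?_, ?_, ?_⟩ <;> rintro rfl <;> exact absurd hr (by decide)
        have e : pvTarget (x :: xs) seen = pvTarget xs seen := by
          unfold pvTarget
          rw [pvPick_cons_ne, pvPick_cons_ne, pvPick_cons_ne, pvPick_cons_ne] <;>
            simp [hg, h4.1, h4.2.1, h4.2.2.1, h4.2.2.2]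
        rw [e]; exact ih seen
      | some r =>
        simp only [hr]
        have ht : (t = "curtos" ∧ r = 0) ∨ (t = "hierarquico" ∧ r = 1) ∨
            (t = "topicos" ∧ r = 2) ∨ (t = "sem_restricao" ∧ r = 3) := by
          by_cases h1 : t = "curtos"
          · subst h1
            have e : PySem.Dict.get? pvRank "curtos" = some 0 := by decide
            rw [e] at hr; exact Or.inl ⟨rfl, (Option.some_inj.mp hr).symm⟩
          by_cases h2 : t = "hierarquico"
          · subst h2
            have e : PySem.Dict.get? pvRank "hierarquico" = some 1 := by decide
            rw [e] at hr; exact Or.inr (Or.inl ⟨rfl, (Option.some_inj.mp hr).symm⟩)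
          by_cases h3 : t = "topicos"
          · subst h3
            have e : PySem.Dict.get? pvRank "topicos" = some 2 := by decide
            rw [e] at hr; exact Or.inr (Or.inr (Or.inl ⟨rfl, (Option.some_inj.mp hr).symm⟩))
          by_cases h4 : t = "sem_restricao"
          · subst h4
            have e : PySem.Dict.get? pvRank "sem_restricao" = some 3 := by decide
            rw [e] at hr; exact Or.inr (Or.inr (Or.inr ⟨rfl, (Option.some_inj.mp hr).symm⟩))
          · exfalso
            have e : PySem.Dict.get? pvRank t = none := by
              simp [pvRank, PySem.Dict.get?, Ne.symm h1, Ne.symm h2, Ne.symm h3, Ne.symm h4]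
            rw [e] at hr; cases hr
        by_cases hs : seen.contains t
        · simp only [hs, if_true]
          have e : pvTarget (x :: xs) seen = pvTarget xs seen := by
            unfold pvTarget
            rcases ht with ⟨h,_⟩|⟨h,_⟩|⟨h,_⟩|⟨h,_⟩ <;> subst h <;>
              rw [pvPick_of_contains _ _ _ _ hs, pvPick_of_contains _ _ _ _ hs,
                pvPick_cons_ne _ _ _ _ _ (by rw [hg]; decide),
                pvPick_cons_ne _ _ _ _ _ (by rw [hg]; decide),
                pvPick_cons_ne _ _ _ _ _ (by rw [hg]; decide)]
          rw [e]; exact ih seen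
        · have hs' : t ∉ seen := by simpa using hs
          simp only [hs, if_false, Bool.false_eq_true]
          have hself : ∀ r' : Int, pvPick (x :: xs) seen r' t = [(r', x)] := by
            intro r'
            simp [pvPick, hs', pvFind_cons, hg]
          rcases ht with ⟨h,h'⟩|⟨h,h'⟩|⟨h,h'⟩|⟨h,h'⟩ <;> subst h <;> subst h'
          · have e1 : pvTarget (x :: xs) seen =
                (0, x) :: (pvPick xs seen 1 "hierarquico" ++ (pvPick xs seen 2 "topicos" ++
                  pvPick xs seen 3 "sem_restricao")) := by
              unfold pvTarget
              rw [hself, pvPick_cons_ne _ _ _ _ _ (by rw [hg]; decide),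
                pvPick_cons_ne _ _ _ _ _ (by rw [hg]; decide),
                pvPick_cons_ne _ _ _ _ _ (by rw [hg]; decide)]
              simp [List.append_assoc]
            have e2 : pvTarget xs (PySem.Set.add seen "curtos") =
                pvPick xs seen 1 "hierarquico" ++ (pvPick xs seen 2 "topicos" ++
                  pvPick xs seen 3 "sem_restricao") := by
              unfold pvTarget
              rw [pvPick_add_self, pvPick_add_ne _ _ _ _ _ (by decide),
                pvPick_add_ne _ _ _ _ _ (by decide), pvPick_add_ne _ _ _ _ _ (by decide)]
              simp [List.append_assoc]
            rw [e1]
            refine List.Perm.cons _ ?_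
            rw [← e2]; exact ih _
          · have e1 : pvTarget (x :: xs) seen =
                pvPick xs seen 0 "curtos" ++ ((1, x) ::
                  (pvPick xs seen 2 "topicos" ++ pvPick xs seen 3 "sem_restricao")) := by
              unfold pvTarget
              rw [hself, pvPick_cons_ne _ _ _ _ _ (by rw [hg]; decide),
                pvPick_cons_ne _ _ _ _ _ (by rw [hg]; decide),
                pvPick_cons_ne _ _ _ _ _ (by rw [hg]; decide)]
              simp [List.append_assoc]
            have e2 : pvTarget xs (PySem.Set.add seen "hierarquico") =
                pvPick xs seen 0 "curtos" ++ (pvPick xs seen 2 "topicos" ++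
                  pvPick xs seen 3 "sem_restricao") := by
              unfold pvTarget
              rw [pvPick_add_self, pvPick_add_ne _ _ _ _ _ (by decide),
                pvPick_add_ne _ _ _ _ _ (by decide), pvPick_add_ne _ _ _ _ _ (by decide)]
              simp [List.append_assoc]
            rw [e1]
            refine List.perm_middle.trans (List.Perm.cons _ ?_)
            rw [← e2]; exact ih _
          · have e1 : pvTarget (x :: xs) seen =
                (pvPick xs seen 0 "curtos" ++ pvPick xs seen 1 "hierarquico") ++ ((2, x) ::
                  pvPick xs seen 3 "sem_restricao") := by
              unfold pvTarget
              rw [hself, pvPick_cons_ne _ _ _ _ _ (by rw [hg]; decide),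
                pvPick_cons_ne _ _ _ _ _ (by rw [hg]; decide),
                pvPick_cons_ne _ _ _ _ _ (by rw [hg]; decide)]
              simp [List.append_assoc]
            have e2 : pvTarget xs (PySem.Set.add seen "topicos") =
                (pvPick xs seen 0 "curtos" ++ pvPick xs seen 1 "hierarquico") ++
                  pvPick xs seen 3 "sem_restricao" := by
              unfold pvTarget
              rw [pvPick_add_self, pvPick_add_ne _ _ _ _ _ (by decide),
                pvPick_add_ne _ _ _ _ _ (by decide), pvPick_add_ne _ _ _ _ _ (by decide)]
              simp [List.append_assoc]
            rw [e1]
            refine List.perm_middle.trans (List.Perm.cons _ ?_)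
            rw [← e2]; exact ih _
          · have e1 : pvTarget (x :: xs) seen =
                ((pvPick xs seen 0 "curtos" ++ pvPick xs seen 1 "hierarquico") ++
                  pvPick xs seen 2 "topicos") ++ ((3, x) :: []) := by
              unfold pvTarget
              rw [hself, pvPick_cons_ne _ _ _ _ _ (by rw [hg]; decide),
                pvPick_cons_ne _ _ _ _ _ (by rw [hg]; decide),
                pvPick_cons_ne _ _ _ _ _ (by rw [hg]; decide)]
            have e2 : pvTarget xs (PySem.Set.add seen "sem_restricao") =
                ((pvPick xs seen 0 "curtos" ++ pvPick xs seen 1 "hierarquico") ++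
                  pvPick xs seen 2 "topicos") ++ ([] : List (Int × List (String × String))) := by
              unfold pvTarget
              rw [pvPick_add_self, pvPick_add_ne _ _ _ _ _ (by decide),
                pvPick_add_ne _ _ _ _ _ (by decide), pvPick_add_ne _ _ _ _ _ (by decide)]
            rw [e1]
            refine List.perm_middle.trans (List.Perm.cons _ ?_)
            rw [← e2]; exact ih _

theorem target_pairwise (xs : List (List (String × String))) :
    (pvTarget xs []).Pairwise (fun a b => a.1 < b.1) := by
  unfold pvTarget pvPick
  cases pvFind xs "curtos" <;> cases pvFind xs "hierarquico" <;>
    cases pvFind xs "topicos" <;> cases pvFind xs "sem_restricao" <;>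
      norm_num [List.pairwise_cons]

theorem A_as_picks (xs : List (List (String × String))) :
    select_preview_examples xs = (pvTarget xs []).map (·.2) := by
  unfold select_preview_examples pvTarget pvPick pvFind
  simp only [List.foldl]
  cases xs.find? (fun item => pyGetA item "summary_type" == some "curtos") <;>
    cases xs.find? (fun item => pyGetA item "summary_type" == some "hierarquico") <;>
      cases xs.find? (fun item => pyGetA item "summary_type" == some "topicos") <;>
        cases xs.find? (fun item => pyGetA item "summary_type" == some "sem_restricao") <;>
          simp

-- ===== VERDICT (by name: the statement is the Claim_ definition above) =====
theorem select_preview_examples_spec : Claim_equal_select_preview_examples := by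
  intro xs _
  show select_preview_examples xs =
    (PySem.List.sorted (xs.foldl bStep ([], [])).2 (fun p => p.1) false).map (·.2)
  rw [foldl_bStep_snd, List.nil_append]
  have hsort : PySem.List.sorted (pvCollect xs []) (fun p : Int × List (String × String) => p.1) false
      = pvTarget xs [] :=
    PySem.List.sorted_eq_of_perm_of_pairwise_lt _ _ (fun p : Int × List (String × String) => p.1) (pvCollect_perm xs []) (target_pairwise xs)
  rw [hsort]
  exact A_as_picks xs
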